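-- pv_equiv track=rewrite | github.com/JakubDotPy/aoc2023 | day13/part1.py | compute
-- ===== SOURCE A (Python) =====
-- import itertools
--
-- def find_symetry_index(lines: list[str]) -> int:
--     for idx, (left, right) in enumerate(itertools.pairwise(lines), start=1):
--         if left != right:
--             continue
--         # possible symetry, fan out and compare
--         right_part = lines[idx:]
--         left_part = lines[:idx]
--         if all(
--             left_cand == right_cand
--             for left_cand, right_cand in zip(reversed(left_part), right_part)
--         ):
--             return idx
--     return 0
--
-- def compute(s: str) -> int:
--
--     total = 0
--
--     for batch in s.split('\n\n'):
--         rows = batch.splitlines()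
--         cols = list(zip(*rows))
--
--         column_idx = find_symetry_index(cols)
--         row_idx = find_symetry_index(rows)
--
--         total += column_idx + row_idx * 100
--
--
--     return total
-- ===== SOURCE B (Python) =====
-- def _mirror(n, eq):
--     # Manacher over even centers: p[j] = maximal k such that positions
--     # j-1-t and j+t are eq for all t < k (palindromic radius at gap j),
--     # computed with reuse of previously found radii.
--     p = [0] * (n + 1)
--     l = r = 0
--     for j in range(1, n):
--         k = min(p[l + r - j], r - j) if j < r else 0
--         while k < j and j + k < n and eq(j - k - 1, j + k):
--             k += 1
--         p[j] = k
--         if j + k > r: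
--             l, r = j - k, j + k
--     # a mirror line sits at the first gap whose radius reaches an edge
--     for j in range(1, n):
--         if p[j] >= min(j, n - j):
--             return j
--     return 0
--
--
-- def compute(s: str) -> int:
--     total = 0
--     for batch in s.split('\n\n'):
--         rows = batch.splitlines()
--         n = len(rows)
--         nc = min((len(r) for r in rows), default=0)
--         row_idx = _mirror(n, lambda x, y: rows[x] == rows[y])
--         col_idx = _mirror(nc, lambda x, y: all(r[x] == r[y] for r in rows))
--         total += col_idx + row_idx * 100
--     return total
-- ===== Notes on version B (the rewrite author's own statement) =====
-- stated objective: alternative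
-- what changed: B replaces A's adjacent-pair filter plus reversed-prefix/suffix fan-out by Manacher's algorithm: it builds the array of palindromic radii at every gap (reusing mirrored radii inside the rightmost known palindrome) and then returns the first gap whose radius reaches an edge; the column axis is handled through an index-equality predicate over the rows instead of materialising the transposed grid.
import Mathlib
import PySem

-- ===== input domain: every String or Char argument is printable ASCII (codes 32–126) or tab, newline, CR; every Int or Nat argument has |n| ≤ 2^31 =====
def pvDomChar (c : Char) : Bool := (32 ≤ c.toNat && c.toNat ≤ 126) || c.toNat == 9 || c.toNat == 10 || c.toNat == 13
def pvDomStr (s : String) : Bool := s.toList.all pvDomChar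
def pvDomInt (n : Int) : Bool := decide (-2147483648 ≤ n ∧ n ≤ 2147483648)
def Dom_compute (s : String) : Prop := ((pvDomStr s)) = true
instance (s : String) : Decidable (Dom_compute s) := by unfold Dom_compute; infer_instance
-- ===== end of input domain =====

-- B replaces A's pairwise-filter + fan-out mirror search by Manacher's algorithm:
-- it computes the palindromic radius at every gap (reusing earlier radii) and then
-- scans for the first radius reaching an edge; columns are handled through an
-- index-equality predicate instead of transposing. Objective: alternative.

-- ===== PORT A =====

-- itertools.pairwise
def pyPairwise {α : Type} : List α → List (α × α)
  | [] => []
  | [_] => []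
  | a :: b :: rest => (a, b) :: pyPairwise (b :: rest)

-- the 'for idx, (left, right) in enumerate(pairwise(lines), start=1)' loop of find_symetry_index
def fsiGo {α : Type} [DecidableEq α] (lines : List α) : List (Int × (α × α)) → Int
  | [] => 0
  | (idx, (left, right)) :: rest =>
    if left ≠ right then fsiGo lines rest
    else
      let right_part := PySem.List.slice lines (some idx) none
      let left_part := PySem.List.slice lines none (some idx)
      if (left_part.reverse.zip right_part).all (fun p => p.1 == p.2) then idx
      else fsiGo lines rest

def find_symetry_index {α : Type} [DecidableEq α] (lines : List α) : Int :=
  fsiGo lines (PySem.List.enumerate (pyPairwise lines) 1)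

-- termination helper for zipStar (cited in its decreasing_by)
theorem zipStar_measure (L : List (List Char)) (hne : L ≠ []) (hall : ¬ L.any (·.isEmpty) = true) :
    ((L.map List.tail).map List.length).sum < (L.map List.length).sum := by
  simp only [List.any_eq_true, not_exists, not_and] at hall
  induction L with
  | nil => exact absurd rfl hne
  | cons r L ih =>
    have hr : r ≠ [] := by
      have := hall r (by simp)
      cases r <;> simp_all
    cases L with
    | nil =>
      have : r.length ≠ 0 := by simpa using hr
      simp only [List.map_cons, List.map_nil, List.sum_cons, List.sum_nil, List.length_tail]
      omega
    | cons r' L' =>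
      have := ih (by simp) (fun x hx => hall x (by simp [hx]))
      simp only [List.map_cons, List.sum_cons, List.length_tail] at *
      have : r.length ≠ 0 := by simpa using hr
      omega

-- zip(*rows): truncating transpose
def zipStar (L : List (List Char)) : List (List Char) :=
  if _h : L = [] ∨ L.any (·.isEmpty) then []
  else (L.map (fun r => r.headD ' ')) :: zipStar (L.map List.tail)
termination_by (L.map List.length).sum
decreasing_by
  simp only [List.map_subtype, List.unattach_attach]
  exact zipStar_measure L (by tauto) (by tauto)

def compute (s : String) : Int :=
  ((PySem.Str.split? s "\n\n").getD []).foldl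
    (fun total batch =>
      let rows := PySem.Str.splitlines batch
      let cols := zipStar (rows.map String.toList)
      let column_idx := find_symetry_index cols
      let row_idx := find_symetry_index rows
      total + (column_idx + row_idx * 100))
    0

-- ===== PORT B =====

-- the 'while k < j and j + k < n and eq(j - k - 1, j + k): k += 1' loop of _mirror
def expandB (eq : Nat → Nat → Bool) (n j k : Nat) : Nat :=
  if h : k < j ∧ j + k < n ∧ eq (j - k - 1) (j + k) = true then expandB eq n j (k + 1)
  else k
termination_by min j (n - j) - k
decreasing_by
  obtain ⟨h1, h2, -⟩ := h
  omega

-- the 'for j in range(1, n)' loop of _mirror, carrying (p, l, r)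
def manLoop (eq : Nat → Nat → Bool) (n j : Nat) (p : Array Nat) (l r : Nat) : Array Nat :=
  if j < n then
    let k0 := if j < r then min (p.getD (l + r - j) 0) (r - j) else 0
    let k := expandB eq n j k0
    let p' := p.setIfInBounds j k
    if r < j + k then manLoop eq n (j + 1) p' (j - k) (j + k)
    else manLoop eq n (j + 1) p' l r
  else p
termination_by n - j

-- the final 'for j in range(1, n): if p[j] >= min(j, n - j): return j' loop of _mirror
def scanB (p : Array Nat) (n j : Nat) : Int :=
  if j < n then
    if min j (n - j) ≤ p.getD j 0 then (j : Int) else scanB p n (j + 1)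
  else 0
termination_by n - j

def mirrorB (n : Nat) (eq : Nat → Nat → Bool) : Int :=
  scanB (manLoop eq n 1 (Array.replicate (n + 1) 0) 0 0) n 1

def compute_alt (s : String) : Int :=
  ((PySem.Str.split? s "\n\n").getD []).foldl
    (fun total batch =>
      let rows := PySem.Str.splitlines batch
      let n := rows.length
      let nc := ((rows.map (fun r => r.toList.length)).min?).getD 0
      let row_idx := mirrorB n (fun x y => rows.getD x "" == rows.getD y "")
      let col_idx := mirrorB nc
        (fun x y => rows.all (fun rw => rw.toList.getD x ' ' == rw.toList.getD y ' '))
      total + (col_idx + row_idx * 100))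
    0

-- ===== PRECONDITION & SPEC =====
def Spec_compute (s : String) (out : Int) : Prop := out = compute_alt s
instance (s : String) (out : Int) : Decidable (Spec_compute s out) := by unfold Spec_compute; infer_instance

-- ===== CLAIM (what is proved, stated in full; the proofs are below) =====
def Claim_equal_compute : Prop := ∀ (s : String), Dom_compute s → Spec_compute s (compute s)

-- ===== LEMMAS AND PROOFS =====

-- proof-side first-mirror scan over slice comparisons (intermediate between A and B)
def bRowGo {α : Type} [DecidableEq α] (lines : List α) (n : Nat) (i : Nat) : Int :=
  if i < n then
    let m := min i (n - i)
    if PySem.List.slice lines (some ((i : Int) - (m : Int))) (some (i : Int)) =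
        (PySem.List.slice lines (some (i : Int)) (some ((i : Int) + (m : Int)))).reverse
    then (i : Int) else bRowGo lines n (i + 1)
  else 0
termination_by n - i

-- number of columns: min row length (0 for no rows)
def ncl (L : List (List Char)) : Nat := ((L.map List.length).min?).getD 0

theorem foldl_min_comm (X : List Nat) (a b : Nat) :
    X.foldl min (min a b) = min a (X.foldl min b) := List.foldl_assoc

theorem ncl_cons (r : List Char) (L : List (List Char)) :
    ncl (r :: L) = if L = [] then r.length else min r.length (ncl L) := by
  cases L with
  | nil => simp [ncl]
  | cons r' L' =>
    simp only [ncl, List.map_cons, List.min?_cons', Option.getD_some,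
      if_neg (by simp : ¬ (r' :: L' = []))]
    rw [show (r'.length :: List.map List.length L').foldl min r.length
          = (List.map List.length L').foldl min (min r.length r'.length) from rfl]
    rw [foldl_min_comm]

theorem ncl_le {r : List Char} {L : List (List Char)} (h : r ∈ L) : ncl L ≤ r.length := by
  induction L with
  | nil => simp at h
  | cons x L ih =>
    rw [ncl_cons]
    rcases List.mem_cons.mp h with h' | h'
    · subst h'; split <;> simp
    · have := ih h'
      have hne : L ≠ [] := by rintro rfl; simp at h'
      rw [if_neg hne]
      omega

theorem ncl_tail (L : List (List Char)) (hne : L ≠ []) (hall : ∀ r ∈ L, r ≠ []) :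
    ncl (L.map List.tail) + 1 = ncl L := by
  induction L with
  | nil => exact absurd rfl hne
  | cons r L ih =>
    have hr : r.length ≠ 0 := by simpa using hall r (by simp)
    cases L with
    | nil => simp [ncl, List.length_tail]; omega
    | cons r' L' =>
      have hih := ih (by simp) (fun x hx => hall x (by simp [hx]))
      simp only [List.map_cons] at *
      rw [ncl_cons, ncl_cons (L := r' :: L'),
        if_neg (by simp : ¬ (r'.tail :: List.map List.tail L' = [])),
        if_neg (by simp : ¬ (r' :: L' = []))]
      simp only [List.length_tail]
      omega

theorem zipStar_length (L : List (List Char)) : (zipStar L).length = ncl L := by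
  fun_induction zipStar with
  | case1 L h =>
    rcases h with rfl | h
    · simp [ncl]
    · simp only [List.any_eq_true] at h
      obtain ⟨r, hr, he⟩ := h
      have := ncl_le hr
      simp only [List.isEmpty_iff] at he
      subst he
      have h0 : ncl L ≤ 0 := by simpa using this
      simp only [List.length_nil]
      omega
  | case2 L h ih =>
    have hne : L ≠ [] := fun e => h (Or.inl e)
    have hany : ¬ (L.any (·.isEmpty)) = true := fun e => h (Or.inr e)
    have hall : ∀ r ∈ L, r ≠ [] := by
      intro r hr
      simp only [List.any_eq_true, not_exists, not_and] at hany
      simpa using hany r hr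
    have ih' : (zipStar (L.map List.tail)).length = ncl (L.map List.tail) := by
      simpa [List.map_subtype, List.unattach_attach] using ih
    have := ncl_tail L hne hall
    simp only [List.length_cons, ih']
    omega

theorem zipStar_getElem? (L : List (List Char)) :
    ∀ j, j < ncl L → (zipStar L)[j]? = some (L.map (fun r => r.getD j ' ')) := by
  fun_induction zipStar with
  | case1 L h =>
    intro j hj
    exfalso
    rcases h with rfl | h
    · simp [ncl] at hj
    · simp only [List.any_eq_true] at h
      obtain ⟨r, hr, he⟩ := h
      have := ncl_le hr
      simp only [List.isEmpty_iff] at he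
      subst he
      simp at this
      omega
  | case2 L h ih =>
    have hne : L ≠ [] := fun e => h (Or.inl e)
    have hany : ¬ (L.any (·.isEmpty)) = true := fun e => h (Or.inr e)
    have hall : ∀ r ∈ L, r ≠ [] := by
      intro r hr
      simp only [List.any_eq_true, not_exists, not_and] at hany
      simpa using hany r hr
    have ih' : ∀ j, j < ncl (L.map List.tail) →
        (zipStar (L.map List.tail))[j]? = some ((L.map List.tail).map (fun r => r.getD j ' ')) := by
      simpa [List.map_subtype, List.unattach_attach] using ih
    have hnt := ncl_tail L hne hall
    intro j hj
    cases j with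
    | zero =>
      simp only [List.getElem?_cons_zero, Option.some_inj]
      apply List.map_congr_left
      intro r hr
      rcases List.exists_cons_of_ne_nil (hall r hr) with ⟨a, t, rfl⟩
      rfl
    | succ j =>
      simp only [List.getElem?_cons_succ]
      rw [ih' j (by omega)]
      simp only [Option.some_inj, List.map_map]
      apply List.map_congr_left
      intro r hr
      rcases List.exists_cons_of_ne_nil (hall r hr) with ⟨a, t, rfl⟩
      rfl

theorem pyPairwise_eq_zip {α : Type} (l : List α) : pyPairwise l = l.zip l.tail := by
  match l with
  | [] => rfl
  | [_] => rfl
  | a :: b :: rest => simp [pyPairwise, pyPairwise_eq_zip (b :: rest)]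

theorem zipAll_take {α : Type} [DecidableEq α] (X Y : List α) :
    ((X.zip Y).all fun p => p.1 == p.2) = true ↔ X.take Y.length = Y.take X.length := by
  induction X generalizing Y with
  | nil => simp
  | cons x X ih =>
    cases Y with
    | nil => simp
    | cons y Y =>
      simp only [List.zip_cons_cons, List.all_cons, Bool.and_eq_true, beq_iff_eq,
        List.length_cons, List.take_succ_cons, List.cons.injEq]
      rw [ih Y]

-- A's per-candidate test (adjacency filter + zip fan-out) coincides with the slice-palindrome test
theorem mirror_iff {α : Type} [DecidableEq α] (lines : List α) (i : Nat) (h1 : 1 ≤ i)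
    (h2 : i < lines.length) :
    ((lines[i-1]'(by omega) = lines[i]'h2) ∧
      (((PySem.List.slice lines none (some (i:Int))).reverse.zip
          (PySem.List.slice lines (some (i:Int)) none)).all (fun p => p.1 == p.2)) = true)
    ↔ PySem.List.slice lines (some ((i:Int) - ((min i (lines.length - i) : Nat) : Int))) (some (i:Int)) =
        (PySem.List.slice lines (some (i:Int)) (some ((i:Int) + ((min i (lines.length - i) : Nat) : Int)))).reverse := by
  set n := lines.length with hn
  set m := min i (n - i) with hm
  have hmi : m ≤ i := min_le_left _ _
  have hmni : m ≤ n - i := min_le_right _ _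
  have hm1 : 1 ≤ m := by omega
  have e1 : (i:Int) - (m:Int) = ((i - m : Nat) : Int) := by omega
  rw [e1, PySem.List.slice_natCast, PySem.List.slice_natCast_add,
    show i - (i - m) = m by omega]
  rw [PySem.List.slice_to_natCast, PySem.List.slice_from_natCast, zipAll_take]
  have hlt : (lines.take i).length = i := by simp; omega
  have hld : (lines.drop i).length = n - i := by simp [hn]
  rw [List.length_reverse, hlt, hld, List.take_reverse, hlt,
    show i - (n - i) = i - m by omega, List.drop_take, show i - (i - m) = m by omega]
  have hr : (lines.drop i).take i = (lines.drop i).take m := by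
    rcases Nat.le_total i (n - i) with h | h
    · rw [show m = i by omega]
    · rw [show m = n - i by omega, List.take_of_length_le (by omega),
        List.take_of_length_le (by omega)]
  rw [hr]
  constructor
  · rintro ⟨-, hall⟩
    rw [List.reverse_eq_iff] at hall
    exact hall
  · intro hE
    refine ⟨?_, by rw [List.reverse_eq_iff]; exact hE⟩
    have hlen : ((lines.drop i).take m).length = m := by simp [hld]; omega
    have := congrArg (fun l => l[m-1]?) hE
    simp only at this
    rw [List.getElem?_take, if_pos (by omega), List.getElem?_drop,
      List.getElem?_reverse (by omega : m - 1 < ((lines.drop i).take m).length),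
      hlen, List.getElem?_take, if_pos (by omega), List.getElem?_drop] at this
    rw [show i - m + (m - 1) = i - 1 by omega, show i + (m - 1 - (m - 1)) = i by omega] at this
    rw [List.getElem?_eq_getElem (by omega), List.getElem?_eq_getElem (by omega)] at this
    simpa using this

theorem fsiGo_eq {α : Type} [DecidableEq α] (lines : List α) (i : Nat) (h1 : 1 ≤ i) :
    fsiGo lines (PySem.List.enumerate ((lines.drop (i-1)).zip (lines.drop i)) (i:Int)) =
      bRowGo lines lines.length i := by
  induction hk : lines.length - i generalizing i with
  | zero =>
    have hni : lines.length ≤ i := by omega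
    rw [List.drop_eq_nil_of_le hni, List.zip_nil_right, PySem.List.enumerate_nil,
      bRowGo, if_neg (by omega)]
    rfl
  | succ k ih =>
    have h2 : i < lines.length := by omega
    rw [List.drop_eq_getElem_cons (show i - 1 < lines.length by omega),
      show i - 1 + 1 = i from by omega,
      List.drop_eq_getElem_cons h2, List.zip_cons_cons, PySem.List.enumerate_cons]
    rw [show (i:Int) + 1 = ((i+1 : Nat) : Int) from by push_cast; ring]
    have hrec := ih (i+1) (by omega) (by omega)
    rw [show ((i:Nat)+1) - 1 = i from by omega,
      List.drop_eq_getElem_cons h2] at hrec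
    simp only [fsiGo]
    rw [bRowGo, if_pos h2]
    simp only []
    by_cases hadj : lines[i-1]'(by omega) = lines[i]'h2
    · rw [if_neg (by simpa using hadj)]
      by_cases hall : (((PySem.List.slice lines none (some (i:Int))).reverse.zip
          (PySem.List.slice lines (some (i:Int)) none)).all (fun p => p.1 == p.2)) = true
      · rw [if_pos hall, if_pos ((mirror_iff lines i h1 h2).mp ⟨hadj, hall⟩)]
      · rw [if_neg hall, if_neg (fun hE => hall ((mirror_iff lines i h1 h2).mpr hE).2), hrec]
    · rw [if_pos (by simpa using hadj),
        if_neg (fun hE => hadj ((mirror_iff lines i h1 h2).mpr hE).1), hrec]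

theorem fsi_eq_bRowGo {α : Type} [DecidableEq α] (lines : List α) :
    find_symetry_index lines = bRowGo lines lines.length 1 := by
  have h := fsiGo_eq lines 1 le_rfl
  simp only [Nat.sub_self, List.drop_zero, List.drop_one, Nat.cast_one] at h
  rw [find_symetry_index, pyPairwise_eq_zip]
  exact h

theorem mirror_pointwise {β : Type} (Z : List β) (i m : Nat) (him : i + m ≤ Z.length) :
    ((Z.drop (i-m)).take m = ((Z.drop i).take m).reverse) ↔
      ∀ j, j < m → Z[i-m+j]? = Z[i+(m-1-j)]? := by
  have hlen : ((Z.drop i).take m).length = m := by simp; omega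
  rw [List.ext_getElem?_iff]
  constructor
  · intro h j hj
    have := h j
    rw [List.getElem?_take, if_pos hj, List.getElem?_drop,
      List.getElem?_reverse (by omega : j < ((Z.drop i).take m).length), hlen,
      List.getElem?_take, if_pos (by omega), List.getElem?_drop] at this
    exact this
  · intro h j
    by_cases hj : j < m
    · rw [List.getElem?_take, if_pos hj, List.getElem?_drop,
        List.getElem?_reverse (by omega : j < ((Z.drop i).take m).length), hlen,
        List.getElem?_take, if_pos (by omega), List.getElem?_drop]
      exact h j hj
    · rw [List.getElem?_eq_none (by simp; omega), List.getElem?_eq_none (by simp; omega)]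

theorem mirror_reindex {β : Type} (Z : List β) (i m : Nat) (hm : m ≤ i) :
    (∀ j, j < m → Z[i-m+j]? = Z[i+(m-1-j)]?) ↔ (∀ t, t < m → Z[i-1-t]? = Z[i+t]?) := by
  constructor
  · intro h t ht
    have := h (m-1-t) (by omega)
    rw [show i-m+(m-1-t) = i-1-t by omega, show m-1-(m-1-t) = t by omega] at this
    exact this
  · intro h j hj
    have := h (m-1-j) (by omega)
    rw [show i-1-(m-1-j) = i-m+j by omega] at this
    exact this

-- ===== expandB characterisation =====

theorem expand_matches (eq : Nat → Nat → Bool) (n j : Nat) :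
    ∀ k t, k ≤ t → t < expandB eq n j k →
      (t < j ∧ j + t < n ∧ eq (j - t - 1) (j + t) = true) := by
  intro k
  fun_induction expandB eq n j k with
  | case1 k h ih =>
    intro t hkt htl
    rcases Nat.eq_or_lt_of_le hkt with rfl | hlt
    · exact h
    · exact ih t hlt htl
  | case2 k h =>
    intro t hkt htl
    omega

theorem expand_stop (eq : Nat → Nat → Bool) (n j k : Nat) :
    ¬ (expandB eq n j k < j ∧ j + expandB eq n j k < n ∧
        eq (j - expandB eq n j k - 1) (j + expandB eq n j k) = true) := by
  fun_induction expandB eq n j k with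
  | case1 k h ih => exact ih
  | case2 k h => exact h

theorem expand_bound (eq : Nat → Nat → Bool) (n j : Nat) :
    ∀ k, k ≤ min j (n - j) → expandB eq n j k ≤ min j (n - j) := by
  intro k
  fun_induction expandB eq n j k with
  | case1 k h ih =>
    intro _
    exact ih (by omega)
  | case2 k h => intro hk; exact hk

theorem expand_le_min (eq : Nat → Nat → Bool) (n j : Nat) :
    expandB eq n j 0 ≤ min j (n - j) := expand_bound eq n j 0 (Nat.zero_le _)

theorem le_expand_of_valid (eq : Nat → Nat → Bool) (n j m : Nat)
    (h : ∀ t, t < m → (t < j ∧ j + t < n ∧ eq (j - t - 1) (j + t) = true)) :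
    m ≤ expandB eq n j 0 := by
  by_contra hlt
  rw [Nat.not_le] at hlt
  exact expand_stop eq n j 0 (h _ hlt)

theorem expand_eq_of_le (eq : Nat → Nat → Bool) (n j k : Nat)
    (h : k ≤ expandB eq n j 0) : expandB eq n j k = expandB eq n j 0 := by
  induction hd : expandB eq n j 0 - k generalizing k with
  | zero =>
    have hk : k = expandB eq n j 0 := by omega
    subst hk
    rw [expandB, dif_neg (expand_stop eq n j 0)]
  | succ d ih =>
    have hk : k < expandB eq n j 0 := by omega
    have hm := expand_matches eq n j 0 k (Nat.zero_le _) hk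
    rw [expandB, dif_pos hm]
    exact ih (k+1) (by omega) (by omega)

-- the Manacher reuse step is valid: the mirrored radius bounds the true radius
theorem reuse_valid {β : Type} (eq : Nat → Nat → Bool) (n : Nat) (v : Nat → β)
    (heqv : ∀ x y, x < n → y < n → (eq x y = true ↔ v x = v y))
    (c j : Nat) (hcj : c < j) (hjn : j < n) (hjr : j < c + expandB eq n c 0) :
    min (expandB eq n (2*c - j) 0) (c + expandB eq n c 0 - j) ≤ expandB eq n j 0 := by
  have hKc := expand_le_min eq n c
  have hKc1 : expandB eq n c 0 ≤ c := le_trans hKc (min_le_left _ _)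
  have hKc2 : expandB eq n c 0 ≤ n - c := le_trans hKc (min_le_right _ _)
  have h2cj : j < 2*c := by omega
  have hKj' := expand_le_min eq n (2*c - j)
  have hKj'1 : expandB eq n (2*c - j) 0 ≤ 2*c - j := le_trans hKj' (min_le_left _ _)
  apply le_expand_of_valid
  intro t ht
  rw [lt_min_iff] at ht
  obtain ⟨ht1, ht2⟩ := ht
  have htj : t < j := by omega
  have hjtn : j + t < n := by omega
  refine ⟨htj, hjtn, ?_⟩
  rw [heqv _ _ (by omega) (by omega)]
  have radc : ∀ u, u < expandB eq n c 0 → v (c - u - 1) = v (c + u) := by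
    intro u hu
    have hm := expand_matches eq n c 0 u (Nat.zero_le _) hu
    exact (heqv _ _ (by omega) (by omega)).mp hm.2.2
  have radj' : ∀ u, u < expandB eq n (2*c - j) 0 → v (2*c - j - u - 1) = v (2*c - j + u) := by
    intro u hu
    have hm := expand_matches eq n (2*c - j) 0 u (Nat.zero_le _) hu
    exact (heqv _ _ (by omega) (by omega)).mp hm.2.2
  have e1 : v (2*c - j - t - 1) = v (j + t) := by
    have h := radc (j + t - c) (by omega)
    rw [show c - (j + t - c) - 1 = 2*c - j - t - 1 by omega,
      show c + (j + t - c) = j + t by omega] at h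
    exact h
  have e2 : v (j - t - 1) = v (2*c - j + t) := by
    rcases Nat.lt_or_ge (j - t - 1) c with hcase' | hcase
    · have h := radc (c - (j - t - 1) - 1) (by omega)
      rw [show c - (c - (j - t - 1) - 1) - 1 = j - t - 1 by omega,
        show c + (c - (j - t - 1) - 1) = 2*c - j + t by omega] at h
      exact h
    · have h := radc (j - t - 1 - c) (by omega)
      rw [show c - (j - t - 1 - c) - 1 = 2*c - j + t by omega,
        show c + (j - t - 1 - c) = j - t - 1 by omega] at h
      exact h.symm
  have e3 : v (2*c - j - t - 1) = v (2*c - j + t) := radj' t ht1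
  calc v (j - t - 1) = v (2*c - j + t) := e2
    _ = v (2*c - j - t - 1) := e3.symm
    _ = v (j + t) := e1

theorem manLoop_step (eq : Nat → Nat → Bool) (n j : Nat) (p : Array Nat) (l r : Nat)
    (h : j < n) :
    manLoop eq n j p l r =
      if r < j + expandB eq n j (if j < r then min (p.getD (l + r - j) 0) (r - j) else 0) then
        manLoop eq n (j + 1)
          (p.setIfInBounds j (expandB eq n j (if j < r then min (p.getD (l + r - j) 0) (r - j) else 0)))
          (j - expandB eq n j (if j < r then min (p.getD (l + r - j) 0) (r - j) else 0))
          (j + expandB eq n j (if j < r then min (p.getD (l + r - j) 0) (r - j) else 0))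
      else manLoop eq n (j + 1)
        (p.setIfInBounds j (expandB eq n j (if j < r then min (p.getD (l + r - j) 0) (r - j) else 0))) l r := by
  conv_lhs => rw [manLoop]
  rw [if_pos h]

theorem manLoop_spec {β : Type} (eq : Nat → Nat → Bool) (n : Nat) (v : Nat → β)
    (heqv : ∀ x y, x < n → y < n → (eq x y = true ↔ v x = v y)) :
    ∀ (N j : Nat) (p : Array Nat) (l r : Nat), n - j = N → 1 ≤ j → p.size = n + 1 →
    (∀ j', 1 ≤ j' → j' < j → p.getD j' 0 = expandB eq n j' 0) →
    (∃ c, c < j ∧ l = c - expandB eq n c 0 ∧ r = c + expandB eq n c 0) →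
    ∀ i, 1 ≤ i → i < n → (manLoop eq n j p l r).getD i 0 = expandB eq n i 0 := by
  intro N
  induction N with
  | zero =>
    intro j p l r hN h1 hsz hp hc i hi1 hin
    rw [manLoop, if_neg (by omega)]
    exact hp i hi1 (by omega)
  | succ N ih =>
    intro j p l r hN h1 hsz hp hc i hi1 hin
    have hjn : j < n := by omega
    rw [manLoop_step eq n j p l r hjn]
    have hk : expandB eq n j (if j < r then min (p.getD (l + r - j) 0) (r - j) else 0)
        = expandB eq n j 0 := by
      split
      case isTrue hjr =>
        obtain ⟨c, hcj, hl, hr⟩ := hc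
        have hKc := expand_le_min eq n c
        have hKc1 : expandB eq n c 0 ≤ c := le_trans hKc (min_le_left _ _)
        have hjr' : j < c + expandB eq n c 0 := by omega
        have h2cj : j < 2*c := by omega
        have hidx : l + r - j = 2*c - j := by omega
        rw [hidx, hp (2*c - j) (by omega) (by omega),
          show r - j = c + expandB eq n c 0 - j from by omega]
        exact expand_eq_of_le eq n j _ (reuse_valid eq n v heqv c j hcj hjn hjr')
      case isFalse => rfl
    rw [hk]
    have hKj := expand_le_min eq n j
    have hKj1 : expandB eq n j 0 ≤ j := le_trans hKj (min_le_left _ _)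
    have hsz' : (p.setIfInBounds j (expandB eq n j 0)).size = n + 1 := by
      rw [Array.size_setIfInBounds, hsz]
    have hp' : ∀ j', 1 ≤ j' → j' < j + 1 →
        (p.setIfInBounds j (expandB eq n j 0)).getD j' 0 = expandB eq n j' 0 := by
      intro j' hj'1 hj'2
      rcases Nat.lt_or_ge j' j with hlt | hge
      · rw [Array.getD_eq_getD_getElem?, Array.getElem?_setIfInBounds,
          if_neg (by omega), ← Array.getD_eq_getD_getElem?]
        exact hp j' hj'1 hlt
      · have hj'j : j' = j := by omega
        subst hj'j
        rw [Array.getD_eq_getD_getElem?, Array.getElem?_setIfInBounds, if_pos rfl,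
          if_pos (by omega)]
        rfl
    split
    case isTrue hlt =>
      exact ih (j+1) _ _ _ (by omega) (by omega) hsz' hp'
        ⟨j, by omega, rfl, rfl⟩ i hi1 hin
    case isFalse hge =>
      obtain ⟨c, hcj, hl, hr⟩ := hc
      exact ih (j+1) _ _ _ (by omega) (by omega) hsz' hp'
        ⟨c, by omega, hl, hr⟩ i hi1 hin

-- one candidate index: A's slice-mirror test ⟺ the Manacher radius reaches the edge
theorem cond_equiv {α : Type} [DecidableEq α] (lines : List α) (d : α) (eq : Nat → Nat → Bool)
    (heqv : ∀ x y, x < lines.length → y < lines.length →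
      (eq x y = true ↔ lines.getD x d = lines.getD y d))
    (i : Nat) (h1 : 1 ≤ i) (h2 : i < lines.length) :
    (PySem.List.slice lines (some ((i:Int) - ((min i (lines.length - i) : Nat) : Int))) (some (i:Int)) =
        (PySem.List.slice lines (some (i:Int)) (some ((i:Int) + ((min i (lines.length - i) : Nat) : Int)))).reverse)
    ↔ min i (lines.length - i) ≤ expandB eq lines.length i 0 := by
  set n := lines.length with hn
  set m := min i (n - i) with hm
  have hmi : m ≤ i := min_le_left _ _
  have hmni : m ≤ n - i := min_le_right _ _
  have e1 : (i:Int) - (m:Int) = ((i - m : Nat) : Int) := by omega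
  rw [e1, PySem.List.slice_natCast, PySem.List.slice_natCast_add,
    show i - (i - m) = m by omega,
    mirror_pointwise lines i m (by omega),
    mirror_reindex lines i m hmi]
  constructor
  · intro h
    apply le_expand_of_valid
    intro t ht
    refine ⟨by omega, by omega, ?_⟩
    rw [heqv _ _ (by omega) (by omega)]
    have he := h t ht
    rw [List.getElem?_eq_getElem (by omega), List.getElem?_eq_getElem (by omega)] at he
    rw [List.getD_eq_getElem _ _ (by omega), List.getD_eq_getElem _ _ (by omega)]
    simpa [show i - t - 1 = i - 1 - t from by omega] using he
  · intro h t ht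
    have hm' := expand_matches eq n i 0 t (Nat.zero_le _) (lt_of_lt_of_le ht h)
    have he := (heqv _ _ (by omega) (by omega)).mp hm'.2.2
    rw [List.getD_eq_getElem _ _ (by omega), List.getD_eq_getElem _ _ (by omega)] at he
    rw [List.getElem?_eq_getElem (by omega), List.getElem?_eq_getElem (by omega)]
    simpa [show i - t - 1 = i - 1 - t from by omega] using he

theorem bRowGo_eq_scan {α : Type} [DecidableEq α] (lines : List α) (d : α)
    (eq : Nat → Nat → Bool)
    (heqv : ∀ x y, x < lines.length → y < lines.length →
      (eq x y = true ↔ lines.getD x d = lines.getD y d))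
    (parr : Array Nat)
    (hparr : ∀ i, 1 ≤ i → i < lines.length → parr.getD i 0 = expandB eq lines.length i 0) :
    ∀ i, 1 ≤ i → bRowGo lines lines.length i = scanB parr lines.length i := by
  intro i h1
  induction hk : lines.length - i generalizing i with
  | zero => rw [bRowGo, scanB, if_neg (by omega), if_neg (by omega)]
  | succ k ih =>
    have h2 : i < lines.length := by omega
    rw [bRowGo, scanB, if_pos h2, if_pos h2]
    simp only []
    rw [hparr i h1 h2]
    by_cases hc : PySem.List.slice lines (some ((i:Int) - ((min i (lines.length - i) : Nat) : Int))) (some (i:Int)) =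
        (PySem.List.slice lines (some (i:Int)) (some ((i:Int) + ((min i (lines.length - i) : Nat) : Int)))).reverse
    · rw [if_pos hc, if_pos ((cond_equiv lines d eq heqv i h1 h2).mp hc)]
    · rw [if_neg hc, if_neg (fun hb => hc ((cond_equiv lines d eq heqv i h1 h2).mpr hb)),
        ih (i+1) (by omega) (by omega)]

theorem expandB_zero_zero (eq : Nat → Nat → Bool) (n : Nat) : expandB eq n 0 0 = 0 := by
  rw [expandB, dif_neg (by simp)]

theorem fsi_eq_mirrorB {α : Type} [DecidableEq α] (lines : List α) (d : α)
    (eq : Nat → Nat → Bool)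
    (heqv : ∀ x y, x < lines.length → y < lines.length →
      (eq x y = true ↔ lines.getD x d = lines.getD y d)) :
    find_symetry_index lines = mirrorB lines.length eq := by
  rw [fsi_eq_bRowGo, mirrorB]
  apply bRowGo_eq_scan lines d eq heqv _ ?_ 1 le_rfl
  intro i hi1 hin
  apply manLoop_spec eq lines.length (fun x => lines.getD x d) heqv
    (lines.length - 1) 1 _ 0 0 rfl le_rfl
  · simp
  · intro j' hj'1 hj'2
    omega
  · exact ⟨0, Nat.one_pos, by rw [expandB_zero_zero], by rw [expandB_zero_zero]⟩
  · exact hi1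
  · exact hin

-- ===== VERDICT (by name: the statement is the Claim_ definition above) =====
theorem compute_spec : Claim_equal_compute := by
  intro s _
  unfold Spec_compute compute compute_alt
  apply List.foldl_ext
  intro total batch _
  simp only []
  have hnc : ((List.map (fun r => r.toList.length) (PySem.Str.splitlines batch)).min?).getD 0
      = ncl (List.map String.toList (PySem.Str.splitlines batch)) := by
    simp only [ncl, List.map_map]
    rfl
  set rows := PySem.Str.splitlines batch with hrows
  set L := rows.map String.toList with hL
  have hrow : find_symetry_index rows
      = mirrorB rows.length (fun x y => rows.getD x "" == rows.getD y "") := by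
    apply fsi_eq_mirrorB rows "" _
    intro x y hx hy
    exact beq_iff_eq
  have hcol : find_symetry_index (zipStar L)
      = mirrorB (ncl L)
          (fun x y => rows.all (fun rw => rw.toList.getD x ' ' == rw.toList.getD y ' ')) := by
    have hlen : (zipStar L).length = ncl L := zipStar_length L
    rw [← hlen]
    apply fsi_eq_mirrorB (zipStar L) ([] : List Char) _
    intro x y hx hy
    rw [hlen] at hx hy
    have hgx : (zipStar L).getD x [] = L.map (fun r => r.getD x ' ') := by
      rw [List.getD_eq_getElem?_getD, zipStar_getElem? L x hx]; rfl
    have hgy : (zipStar L).getD y [] = L.map (fun r => r.getD y ' ') := by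
      rw [List.getD_eq_getElem?_getD, zipStar_getElem? L y hy]; rfl
    rw [hgx, hgy, List.map_eq_map_iff]
    constructor
    · intro hall rl hrl
      rw [List.all_eq_true] at hall
      rw [hL, List.mem_map] at hrl
      obtain ⟨r, hr, rfl⟩ := hrl
      simpa using hall r hr
    · intro hpt
      rw [List.all_eq_true]
      intro r hr
      have := hpt r.toList (by rw [hL]; exact List.mem_map_of_mem hr)
      simpa using this
  rw [hrow, hcol, hnc]
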